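-- pv_equiv track=rewrite | github.com/Global-Solution-II-2025/Python | app/services/scheduler.py | schedule_blocks
-- ===== SOURCE A (Python) =====
-- def schedule_blocks(availability, total_hours):
--     """
--     availability: {"monday": ["18:00-20:00"], ...}
--     total_hours: int
--     returns: list of blocks
--     """
--     blocks = []
--     hours_left = total_hours
--     for day, windows in availability.items():
--         for w in windows:
--             if hours_left <= 0:
--                 break
--             start, end = w.split("-")
--             # simplistic: assume 2 hours per window
--             blocks.append({"day": day, "start": start, "end": end})
--             hours_left -= 2
--         if hours_left <= 0:
--             break
--     return blocks
-- ===== SOURCE B (Python) =====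
-- def schedule_blocks(availability, total_hours):
--     # closed form: each window consumes 2 hours, so ceil(total_hours/2) windows are needed
--     needed = max(0, (total_hours + 1) // 2)
--     flat = [(day, w) for day, windows in availability.items() for w in windows]
--     blocks = []
--     for day, w in flat[:needed]:
--         start, end = w.split("-")
--         blocks.append({"day": day, "start": start, "end": end})
--     return blocks
-- ===== Notes on version B (the rewrite author's own statement) =====
-- stated objective: simpler
-- what changed: Replaces the nested loop with a running hours_left counter and double early-break by the closed form needed = max(0, (total_hours+1)//2), flattening the windows once and slicing the first `needed` of them.
import Mathlib
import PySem

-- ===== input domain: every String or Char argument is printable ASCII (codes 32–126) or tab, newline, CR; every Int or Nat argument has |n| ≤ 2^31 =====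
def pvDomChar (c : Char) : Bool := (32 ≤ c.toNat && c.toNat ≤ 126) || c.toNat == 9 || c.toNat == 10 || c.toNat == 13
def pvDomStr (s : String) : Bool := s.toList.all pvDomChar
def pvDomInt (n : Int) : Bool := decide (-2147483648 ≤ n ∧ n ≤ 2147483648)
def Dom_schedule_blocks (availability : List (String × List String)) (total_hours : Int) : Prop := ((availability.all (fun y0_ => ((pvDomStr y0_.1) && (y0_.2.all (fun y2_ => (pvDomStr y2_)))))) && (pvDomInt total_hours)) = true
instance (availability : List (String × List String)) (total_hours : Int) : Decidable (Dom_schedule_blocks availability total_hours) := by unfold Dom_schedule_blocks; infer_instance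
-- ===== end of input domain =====

-- B replaces A's running hours_left counter and nested early-break by the closed form
-- needed = max(0, (total_hours+1)//2) applied to the flattened window list (objective: simpler).


-- ===== PORT A =====
-- shared helper for `start, end = w.split("-")`; junk ("","") where Python raises
-- ValueError (those inputs are excluded by Pre_schedule_blocks)
def pvSplitWindow (w : String) : String × String :=
  match PySem.Str.split? w "-" with
  | some [a, b] => (a, b)
  | _ => ("", "")

-- inner `for w in windows:` loop, carrying (blocks, hours_left); stops at the `break`
def pvInnerA (day : String) (windows : List String) (blocks : List (List (String × String)))
    (hoursLeft : Int) : List (List (String × String)) × Int :=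
  match windows with
  | [] => (blocks, hoursLeft)
  | w :: ws =>
    if hoursLeft ≤ 0 then (blocks, hoursLeft)
    else
      let se := pvSplitWindow w
      pvInnerA day ws (blocks ++ [[("day", day), ("start", se.1), ("end", se.2)]]) (hoursLeft - 2)

-- outer `for day, windows in availability.items():` loop with its trailing break
def pvOuterA (items : List (String × List String)) (blocks : List (List (String × String)))
    (hoursLeft : Int) : List (List (String × String)) :=
  match items with
  | [] => blocks
  | (day, ws) :: rest =>
    let r := pvInnerA day ws blocks hoursLeft
    if r.2 ≤ 0 then r.1 else pvOuterA rest r.1 r.2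

def schedule_blocks (availability : List (String × List String)) (total_hours : Int) : List (List (String × String)) :=
  pvOuterA (PySem.Dict.ofList availability).items [] total_hours

-- ===== PORT B =====
def schedule_blocks_alt (availability : List (String × List String)) (total_hours : Int) : List (List (String × String)) :=
  let needed := max 0 (PySem.Int.floordiv (total_hours + 1) 2)
  let flat := (PySem.Dict.ofList availability).items.flatMap (fun p => p.2.map (fun w => (p.1, w)))
  -- flat[:needed] with needed ≥ 0 is List.take needed.toNat
  (flat.take needed.toNat).map (fun p =>
    let se := pvSplitWindow p.2
    [("day", p.1), ("start", se.1), ("end", se.2)])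

-- ===== PRECONDITION & SPEC =====
-- Pre_ excludes exactly the inputs on which A raises ValueError: a window among the
-- first ceil(total_hours/2) taken ones that does not split on "-" into exactly two parts.
def Pre_schedule_blocks (availability : List (String × List String)) (total_hours : Int) : Prop :=
  ∀ w ∈ (((PySem.Dict.ofList availability).items.flatMap (fun p => p.2)).take
      (((total_hours + 1) / 2).toNat)),
    ((PySem.Str.split? w "-").getD []).length = 2
instance (availability : List (String × List String)) (total_hours : Int) : Decidable (Pre_schedule_blocks availability total_hours) := by unfold Pre_schedule_blocks; infer_instance

def pvWitness_schedule_blocks : (List (String × List String)) × Int :=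
  ([("monday", ["18:00-20:00", "08:00-10:00"]), ("tuesday", ["12:00-14:00"])], 3)

def Spec_schedule_blocks (availability : List (String × List String)) (total_hours : Int) (out : List (List (String × String))) : Prop := out = schedule_blocks_alt availability total_hours
instance (availability : List (String × List String)) (total_hours : Int) (out : List (List (String × String))) : Decidable (Spec_schedule_blocks availability total_hours out) := by unfold Spec_schedule_blocks; infer_instance

-- ===== CLAIM (what is proved, stated in full; the proofs are below) =====
def Claim_equal_schedule_blocks : Prop := ∀ (availability : List (String × List String)) (total_hours : Int), Dom_schedule_blocks availability total_hours → Pre_schedule_blocks availability total_hours → Spec_schedule_blocks availability total_hours (schedule_blocks availability total_hours)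

-- ===== LEMMAS AND PROOFS =====
-- number of windows A consumes before hours_left reaches ≤ 0
def pvNeed (hl : Int) : Nat := (max 0 (PySem.Int.floordiv (hl + 1) 2)).toNat

lemma pvNeed_eq (hl : Int) : pvNeed hl = ((hl + 1) / 2).toNat := by
  unfold pvNeed
  rw [PySem.Int.floordiv_eq_ediv_of_pos (by norm_num)]
  omega

lemma pvNeed_zero_iff (hl : Int) : pvNeed hl = 0 ↔ hl ≤ 0 := by
  rw [pvNeed_eq]; omega

lemma pvNeed_succ (hl : Int) (h : 0 < hl) : pvNeed hl = pvNeed (hl - 2) + 1 := by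
  rw [pvNeed_eq, pvNeed_eq]; omega

def pvFmt (p : String × String) : List (String × String) :=
  [("day", p.1), ("start", (pvSplitWindow p.2).1), ("end", (pvSplitWindow p.2).2)]

lemma pvInnerA_eq (day : String) (ws : List String) (blocks : List (List (String × String))) (hl : Int) :
    pvInnerA day ws blocks hl =
      (blocks ++ (ws.take (pvNeed hl)).map (fun w => pvFmt (day, w)),
       hl - 2 * min (pvNeed hl) ws.length) := by
  induction ws generalizing blocks hl with
  | nil => simp [pvInnerA]
  | cons w ws ih =>
    by_cases h : hl ≤ 0
    · have h0 : pvNeed hl = 0 := (pvNeed_zero_iff hl).mpr h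
      simp [pvInnerA, h, h0]
    · simp only [not_le] at h
      rw [pvInnerA]
      simp only [if_neg (by omega : ¬ hl ≤ 0)]
      rw [ih]
      rw [pvNeed_succ hl h]
      simp only [List.take_succ_cons, List.map_cons, List.length_cons, Prod.mk.injEq]
      refine ⟨by simp [pvFmt], by omega⟩

lemma pvOuterA_eq (items : List (String × List String)) (blocks : List (List (String × String))) (hl : Int) :
    pvOuterA items blocks hl =
      blocks ++ ((items.flatMap (fun p => p.2.map (fun w => (p.1, w)))).take (pvNeed hl)).map pvFmt := by
  induction items generalizing blocks hl with
  | nil => simp [pvOuterA]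
  | cons it rest ih =>
    obtain ⟨day, ws⟩ := it
    rw [pvOuterA, pvInnerA_eq]
    simp only [List.flatMap_cons, List.take_append, List.map_append]
    rcases Nat.lt_or_ge ws.length (pvNeed hl) with hlt | hle
    · -- continue with the rest
      have hbr : ¬ hl - 2 * ((min (pvNeed hl) ws.length : Nat) : Int) ≤ 0 := by
        rw [Nat.min_eq_right hlt.le, pvNeed_eq] at *
        omega
      simp only [if_neg hbr]
      rw [ih]
      have h4 : pvNeed (hl - 2 * ((min (pvNeed hl) ws.length : Nat) : Int)) = pvNeed hl - ws.length := by
        rw [Nat.min_eq_right hlt.le, pvNeed_eq, pvNeed_eq]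
        rw [pvNeed_eq] at hlt
        omega
      rw [h4]
      have hlen : (ws.map (fun w => (day, w))).length ≤ pvNeed hl := by simpa using hlt.le
      simp [List.take_of_length_le hlt.le, List.take_of_length_le hlen,
        List.map_map, Function.comp]

    · -- break: everything needed was inside this day's windows
      have hbr : hl - 2 * ((min (pvNeed hl) ws.length : Nat) : Int) ≤ 0 := by
        rw [Nat.min_eq_left hle, pvNeed_eq]; omega
      simp only [if_pos hbr]
      have h3 : pvNeed hl - (ws.map (fun w => (day, w))).length = 0 := by
        simpa using Nat.sub_eq_zero_of_le hle
      rw [h3]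
      simp [← List.map_take, List.map_map, Function.comp]

-- ===== VERDICT (by name: the statement is the Claim_ definition above) =====
theorem schedule_blocks_spec : Claim_equal_schedule_blocks := by
  intro availability total_hours _ _
  unfold Spec_schedule_blocks schedule_blocks schedule_blocks_alt
  rw [pvOuterA_eq]
  simp only [List.nil_append]
  rfl
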